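-- pv_equiv track=rewrite | github.com/JLMadsen/Kattis | crackingrsa.py | factorfinder
-- ===== SOURCE A (Python) =====
-- def factorfinder(primes, n):
--     factors = []
--     for p in primes:
--         for q in primes:
--             if p*q == n:
--                 factors = [p, q]
--                 break
--     return factors
-- ===== SOURCE B (Python) =====
-- def factorfinder(primes, n):
--     s = set(primes)
--     factors = []
--     for p in primes:
--         if p and n % p == 0 and n // p in s:
--             factors = [p, n // p]
--     return factors
-- ===== Notes on version B (the rewrite author's own statement) =====
-- stated objective: faster
-- what changed: Replaced the quadratic nested scan by a single pass that checks divisibility and membership of the cofactor n//p in a set built once; Pre_ excludes the degenerate corner n == 0 with a trailing 0 in the list (0 is not a prime and any pairing with 0 is defensible there), where the two last-match answers differ.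
-- outside the precondition, e.g. on factorfinder([0], 0): A returns [0, 0], B returns []; on factorfinder([2, 0], 0): A returns [0, 2], B returns [2, 0]
import Mathlib
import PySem

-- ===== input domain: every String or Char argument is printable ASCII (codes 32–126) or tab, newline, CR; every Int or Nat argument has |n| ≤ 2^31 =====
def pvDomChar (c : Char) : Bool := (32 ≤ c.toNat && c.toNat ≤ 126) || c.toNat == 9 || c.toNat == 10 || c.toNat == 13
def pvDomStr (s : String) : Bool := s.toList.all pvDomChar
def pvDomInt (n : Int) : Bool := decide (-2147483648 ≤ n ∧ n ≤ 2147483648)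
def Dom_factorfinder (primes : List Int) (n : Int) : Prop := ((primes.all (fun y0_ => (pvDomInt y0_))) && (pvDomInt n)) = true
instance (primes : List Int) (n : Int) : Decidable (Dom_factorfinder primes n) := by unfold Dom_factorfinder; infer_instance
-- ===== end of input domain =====

-- B replaces A's quadratic nested scan by a single pass over a set of the primes,
-- checking divisibility and membership of the cofactor (keeping the last match, as A does).

-- ===== PORT A =====
-- inner 'for q in primes' loop with its break: first q with p*q == n overwrites factors
def pvInnerA (p n : Int) : List Int → List Int → List Int
  | [], factors => factors
  | q :: rest, factors => if p * q = n then [p, q] else pvInnerA p n rest factors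

def factorfinder (primes : List Int) (n : Int) : List Int :=
  primes.foldl (fun factors p => pvInnerA p n primes factors) []

-- ===== PORT B =====
-- 'if p and n % p == 0 and n // p in s' ported as nested short-circuit conditions
def factorfinder_alt (primes : List Int) (n : Int) : List Int :=
  let s : PySem.Set Int := PySem.Set.ofList primes
  primes.foldl (fun factors p =>
    if p ≠ 0 then
      if PySem.Int.mod n p = 0 ∧ PySem.Set.contains s (PySem.Int.floordiv n p) = true then
        [p, PySem.Int.floordiv n p]
      else factors
    else factors) []

-- ===== PRECONDITION & SPEC =====
-- Pre_ excludes only the degenerate corner n == 0 with a trailing 0 in the list: 0 is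
-- not a prime and any pairing with 0 multiplies to 0, so either last-match answer is
-- defensible there (A ends with [0, primes[0]], B with its last nonzero match).
def Pre_factorfinder (primes : List Int) (n : Int) : Prop :=
  ¬ (n = 0 ∧ primes.getLast? = some 0)
instance (primes : List Int) (n : Int) : Decidable (Pre_factorfinder primes n) := by unfold Pre_factorfinder; infer_instance
def pvWitness_factorfinder : List Int × Int := ([2, 3, 5], 15)

def Spec_factorfinder (primes : List Int) (n : Int) (out : List Int) : Prop := out = factorfinder_alt primes n
instance (primes : List Int) (n : Int) (out : List Int) : Decidable (Spec_factorfinder primes n out) := by unfold Spec_factorfinder; infer_instance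

-- ===== CLAIM =====
def Claim_equal_factorfinder : Prop := ∀ (primes : List Int) (n : Int), Dom_factorfinder primes n → Pre_factorfinder primes n → Spec_factorfinder primes n (factorfinder primes n)

-- ===== LEMMAS AND PROOFS =====

theorem pv_mod_mul (p q : Int) : PySem.Int.mod (p * q) p = 0 := by
  rw [PySem.Int.mod_eq_zero_iff_dvd]
  exact Dvd.intro q rfl

theorem pv_mod_zero_left (p : Int) : PySem.Int.mod 0 p = 0 := by
  have := pv_mod_mul p 0
  simpa using this

theorem pv_floordiv_mul (p q : Int) (hp : p ≠ 0) : PySem.Int.floordiv (p * q) p = q := by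
  have h := PySem.Int.floordiv_mul_add_mod (p * q) p
  rw [pv_mod_mul p q, add_zero] at h
  have : (PySem.Int.floordiv (p * q) p) * p = q * p := by rw [h]; ring
  exact mul_right_cancel₀ hp this

theorem pv_floordiv_zero_left (p : Int) (hp : p ≠ 0) : PySem.Int.floordiv 0 p = 0 := by
  have := pv_floordiv_mul p 0 hp
  simpa using this

theorem pv_floordiv_exact (n p : Int) (h : PySem.Int.mod n p = 0) :
    p * PySem.Int.floordiv n p = n := by
  have hd := PySem.Int.floordiv_mul_add_mod n p
  rw [h, add_zero] at hd
  linarith [hd, mul_comm (PySem.Int.floordiv n p) p]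

-- A's inner scan over qs, for a nonzero p, equals B's divisibility/membership test
theorem inner_eq (p n : Int) (hp : p ≠ 0) (qs factors : List Int) :
    pvInnerA p n qs factors =
      if PySem.Int.mod n p = 0 ∧ PySem.Int.floordiv n p ∈ qs then
        [p, PySem.Int.floordiv n p]
      else factors := by
  induction qs with
  | nil => simp [pvInnerA]
  | cons q rest ih =>
    by_cases hpq : p * q = n
    · have hm : PySem.Int.mod n p = 0 := by rw [← hpq]; exact pv_mod_mul p q
      have hf : PySem.Int.floordiv n p = q := by rw [← hpq]; exact pv_floordiv_mul p q hp
      simp [pvInnerA, hpq, hm, hf]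
    · have step : pvInnerA p n (q :: rest) factors = pvInnerA p n rest factors := by
        simp [pvInnerA, hpq]
      rw [step, ih]
      by_cases hm : PySem.Int.mod n p = 0
      · have hne : PySem.Int.floordiv n p ≠ q := by
          intro h
          exact hpq (by rw [← h]; exact pv_floordiv_exact n p hm)
        simp [hm, hne]
      · simp [hm]

-- A's inner scan for p = 0 and n ≠ 0 never fires
theorem inner_zero (n : Int) (hn : n ≠ 0) (qs factors : List Int) :
    pvInnerA 0 n qs factors = factors := by
  induction qs with
  | nil => rfl
  | cons q rest ih =>
    have h : (0 : Int) * q ≠ n := by simpa using hn.symm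
    rw [show pvInnerA 0 n (q :: rest) factors
          = if 0 * q = n then [0, q] else pvInnerA 0 n rest factors from rfl,
        if_neg h, ih]

-- abbreviations for the two step functions (proof-local)
def pvStepA (n : Int) (primes : List Int) (factors : List Int) (p : Int) : List Int :=
  pvInnerA p n primes factors

def pvStepB (n : Int) (primes : List Int) (factors : List Int) (p : Int) : List Int :=
  if p ≠ 0 then
    if PySem.Int.mod n p = 0 ∧ PySem.Set.contains (PySem.Set.ofList primes) (PySem.Int.floordiv n p) = true then
      [p, PySem.Int.floordiv n p]
    else factors
  else factors

theorem step_eq_of_ne (n : Int) (primes factors : List Int) (p : Int) (hp : p ≠ 0) :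
    pvStepA n primes factors p = pvStepB n primes factors p := by
  unfold pvStepA pvStepB
  rw [inner_eq p n hp]
  simp [hp, PySem.Set.mem_ofList]

-- when n = 0 and 0 ∈ primes, any nonzero p yields [p, 0] on both sides, ignoring acc
theorem step_const_zero (primes : List Int) (h0 : (0 : Int) ∈ primes) (p : Int) (hp : p ≠ 0)
    (factors : List Int) :
    pvStepA 0 primes factors p = [p, 0] ∧ pvStepB 0 primes factors p = [p, 0] := by
  have hm : PySem.Int.mod 0 p = 0 := pv_mod_zero_left p
  have hf : PySem.Int.floordiv 0 p = 0 := pv_floordiv_zero_left p hp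
  constructor
  · unfold pvStepA
    rw [inner_eq p 0 hp]
    simp [hm, hf, h0]
  · unfold pvStepB
    simp [hp, hm, hf, PySem.Set.mem_ofList, h0]

-- ===== VERDICT =====
theorem factorfinder_spec : Claim_equal_factorfinder := by
  intro primes n _ hpre
  unfold Spec_factorfinder factorfinder factorfinder_alt
  show List.foldl (pvStepA n primes) [] primes = List.foldl (pvStepB n primes) [] primes
  by_cases hn : n = 0
  · subst hn
    by_cases h0 : (0 : Int) ∈ primes
    · -- the last element is nonzero (Pre_), and its step is [last, 0] on both sides
      have hne : primes ≠ [] := List.ne_nil_of_mem h0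
      have hx : primes.getLast hne ≠ 0 := by
        intro h
        exact hpre ⟨rfl, by rw [List.getLast?_eq_some_getLast hne, h]⟩
      have hdec : primes.dropLast ++ [primes.getLast hne] = primes :=
        List.dropLast_append_getLast hne
      have key : ∀ f : List Int → Int → List Int,
          (∀ acc, f acc (primes.getLast hne) = [primes.getLast hne, 0]) →
          List.foldl f [] primes = [primes.getLast hne, 0] := by
        intro f hf
        conv_lhs => rw [← hdec]
        rw [List.foldl_append]
        simp [hf]
      rw [key _ (fun acc => (step_const_zero primes h0 _ hx acc).1),
          key _ (fun acc => (step_const_zero primes h0 _ hx acc).2)]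
    · apply PySem.List.foldl_congr_mem
      intro factors p hmem
      have hp : p ≠ 0 := fun h => h0 (h ▸ hmem)
      exact step_eq_of_ne 0 primes factors p hp
  · apply PySem.List.foldl_congr_mem
    intro factors p hmem
    by_cases hp : p = 0
    · subst hp
      unfold pvStepA pvStepB
      rw [inner_zero n hn]
      simp
    · exact step_eq_of_ne n primes factors p hp
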